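-- pv_equiv track=rewrite | github.com/pypi-data/pypi-mirror-395 | packages/odc-loader/odc_loader-0.6.0-py3-none-any.whl/odc/loader/_reader.py | pick_overview
-- ===== SOURCE A (Python) =====
-- from typing import Any, Mapping, Optional, Sequence
--
-- def pick_overview(read_shrink: int, overviews: Sequence[int]) -> Optional[int]:
--     if len(overviews) == 0 or read_shrink < overviews[0]:
--         return None
--
--     _idx = 0
--     for idx, ovr in enumerate(overviews):
--         if ovr > read_shrink:
--             break
--         _idx = idx
--
--     return _idx
-- ===== SOURCE B (Python) =====
-- from typing import Optional, Sequence
--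
-- def pick_overview(read_shrink: int, overviews: Sequence[int]) -> Optional[int]:
--     # binary search (bisect_right by hand): overviews assumed sorted ascending
--     lo, hi = 0, len(overviews)
--     while lo < hi:
--         mid = (lo + hi) // 2
--         if read_shrink < overviews[mid]:
--             hi = mid
--         else:
--             lo = mid + 1
--     return None if lo == 0 else lo - 1
-- ===== Notes on version B (the rewrite author's own statement) =====
-- stated objective: faster
-- what changed: Replaces A's left-to-right linear scan for the last overview <= read_shrink with a binary search (hand-written bisect_right, minus one), O(log n) vs O(n); Pre_ requires the list to be partitioned around read_shrink (true of the ascending overview lists the function is for), where both agree.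
-- outside the precondition, e.g. on pick_overview(5, [3, 10, 2, 4]): A returns 0, B returns 3
import Mathlib
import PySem

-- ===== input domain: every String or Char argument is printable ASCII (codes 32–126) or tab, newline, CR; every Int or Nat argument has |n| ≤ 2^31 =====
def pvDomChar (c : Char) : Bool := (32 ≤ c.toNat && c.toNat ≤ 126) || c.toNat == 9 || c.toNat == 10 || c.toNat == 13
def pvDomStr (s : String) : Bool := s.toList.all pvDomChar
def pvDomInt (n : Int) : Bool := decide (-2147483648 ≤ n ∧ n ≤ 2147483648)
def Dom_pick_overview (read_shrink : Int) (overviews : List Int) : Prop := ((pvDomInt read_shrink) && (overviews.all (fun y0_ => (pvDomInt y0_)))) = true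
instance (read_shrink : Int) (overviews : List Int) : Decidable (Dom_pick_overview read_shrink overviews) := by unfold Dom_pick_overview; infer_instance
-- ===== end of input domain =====

-- B replaces A's linear scan with a binary search (bisect_right − 1); equality is claimed on lists partitioned around read_shrink (Pre_), which includes the ascending overview lists the function is for.

-- ===== PORT A =====
-- the `for idx, ovr in enumerate(overviews): if ovr > read_shrink: break; _idx = idx` loop
def pickLoop (read_shrink : Int) : List Int → Int → Int → Int
  | [], _, acc => acc
  | ovr :: rest, idx, acc =>
      if ovr > read_shrink then acc else pickLoop read_shrink rest (idx + 1) idx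

def pick_overview (read_shrink : Int) (overviews : List Int) : Option Int :=
  match overviews with
  | [] => none
  | o0 :: _ =>
      if read_shrink < o0 then none
      else some (pickLoop read_shrink overviews 0 0)

-- ===== PORT B =====
-- the `while lo < hi` bisect_right loop of Source B; getD is exact since mid < hi ≤ len on every call
def bisectLoop (overviews : List Int) (read_shrink : Int) (lo hi : Nat) : Nat :=
  if h : lo < hi then
    let mid := (lo + hi) / 2
    if read_shrink < overviews.getD mid 0 then bisectLoop overviews read_shrink lo mid
    else bisectLoop overviews read_shrink (mid + 1) hi
  else lo
termination_by hi - lo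
decreasing_by all_goals omega

def pick_overview_alt (read_shrink : Int) (overviews : List Int) : Option Int :=
  let i := bisectLoop overviews read_shrink 0 overviews.length
  if i = 0 then none else some ((i : Int) - 1)

-- ===== PRECONDITION & SPEC =====
-- Pre_ excludes lists not partitioned around read_shrink (an element ≤ read_shrink occurring
-- after one > read_shrink): A still returns there, but its linear scan stops at the first
-- element > read_shrink while B's binary search assumes the ascending order overview lists have
-- (any partitioned list suffices), so their values can differ on such lists.
def Pre_pick_overview (read_shrink : Int) (overviews : List Int) : Prop :=
  List.Pairwise (fun a b => a ≤ read_shrink ∨ read_shrink < b) overviews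
instance (read_shrink : Int) (overviews : List Int) : Decidable (Pre_pick_overview read_shrink overviews) := by unfold Pre_pick_overview; infer_instance

def pvWitness_pick_overview : Int × List Int := (4, [1, 2, 4, 8])

def Spec_pick_overview (read_shrink : Int) (overviews : List Int) (out : Option Int) : Prop := out = pick_overview_alt read_shrink overviews
instance (read_shrink : Int) (overviews : List Int) (out : Option Int) : Decidable (Spec_pick_overview read_shrink overviews out) := by unfold Spec_pick_overview; infer_instance

-- ===== CLAIM (what is proved, stated in full; the proofs are below) =====
def Claim_equal_pick_overview : Prop := ∀ (read_shrink : Int) (overviews : List Int), Dom_pick_overview read_shrink overviews → Pre_pick_overview read_shrink overviews → Spec_pick_overview read_shrink overviews (pick_overview read_shrink overviews)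

-- ===== LEMMAS AND PROOFS =====

-- number of leading elements ≤ read_shrink
def tlen (read_shrink : Int) (l : List Int) : Nat :=
  (l.takeWhile (fun o => decide (o ≤ read_shrink))).length

theorem tlen_le (rs : Int) (l : List Int) : tlen rs l ≤ l.length :=
  (List.takeWhile_prefix _).length_le

-- A's loop only reads the takeWhile prefix (no sortedness needed)
theorem pickLoop_eq (rs : Int) (l : List Int) : ∀ idx acc : Int,
    pickLoop rs l idx acc = if tlen rs l = 0 then acc else idx + tlen rs l - 1 := by
  induction l with
  | nil => intro idx acc; simp [pickLoop, tlen]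
  | cons o rest ih =>
      intro idx acc
      by_cases h : o > rs
      · have : ¬ (o ≤ rs) := by omega
        simp [pickLoop, tlen, h, List.takeWhile, this]
      · have hle : o ≤ rs := by omega
        rw [show pickLoop rs (o :: rest) idx acc = pickLoop rs rest (idx + 1) idx by
              simp [pickLoop, h], ih]
        have htw : tlen rs (o :: rest) = tlen rs rest + 1 := by
          simp [tlen, List.takeWhile, hle]
        rw [htw]
        by_cases h0 : tlen rs rest = 0
        · simp [h0]
        · simp [h0]; omega

-- elements inside the takeWhile prefix satisfy the predicate (no sortedness needed)
theorem getD_lt_tlen (rs : Int) (l : List Int) : ∀ i : Nat, i < tlen rs l → l.getD i 0 ≤ rs := by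
  induction l with
  | nil => intro i h; simp [tlen] at h
  | cons o rest ih =>
      intro i h
      by_cases hle : o ≤ rs
      · cases i with
        | zero => simpa using hle
        | succ j =>
            apply ih
            simp [tlen, List.takeWhile, hle] at h ⊢
            omega
      · simp [tlen, List.takeWhile, hle] at h
  
theorem getD_eq_getElem' (l : List Int) (k : Nat) (h : k < l.length) : l.getD k 0 = l[k] := by
  simp [List.getD, List.getElem?_eq_getElem h]

-- the element at the takeWhile boundary fails the predicate
theorem rs_lt_getD_tlen (rs : Int) (l : List Int) :
    tlen rs l < l.length → rs < l.getD (tlen rs l) 0 := by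
  induction l with
  | nil => intro h; simp at h
  | cons o rest ih =>
      intro h
      by_cases ho : o ≤ rs
      · have htw : tlen rs (o :: rest) = tlen rs rest + 1 := by
          simp [tlen, List.takeWhile, ho]
        rw [htw]
        simp only [List.getD_cons_succ]
        exact ih (by simp at h; omega)
      · have htw : tlen rs (o :: rest) = 0 := by
          simp [tlen, List.takeWhile, ho]
        rw [htw]
        simp only [List.getD_cons_zero]
        omega

-- for a list partitioned around rs, an in-range element ≤ rs lies inside the takeWhile prefix
theorem sorted_getD_le (rs : Int) (l : List Int)
    (hs : List.Pairwise (fun a b => a ≤ rs ∨ rs < b) l) :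
    ∀ i : Nat, i < l.length → l.getD i 0 ≤ rs → i < tlen rs l := by
  intro i hi hle
  by_contra hcon
  push Not at hcon
  have hT : tlen rs l < l.length := by omega
  have h1 : rs < l.getD (tlen rs l) 0 := rs_lt_getD_tlen rs l hT
  rcases Nat.lt_or_ge (tlen rs l) i with hlt | hge
  · have hp := (List.pairwise_iff_getElem.mp hs) (tlen rs l) i hT hi hlt
    rw [getD_eq_getElem' l _ hT] at h1
    rw [getD_eq_getElem' l i hi] at hle
    rcases hp with h2 | h2 <;> omega
  · have : tlen rs l = i := by omega
    rw [this] at h1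
    omega

-- bisect correctness: with the invariant lo ≤ tlen ≤ hi ≤ len, the loop returns tlen
theorem bisectLoop_eq (rs : Int) (l : List Int)
    (hs : List.Pairwise (fun a b => a ≤ rs ∨ rs < b) l) :
    ∀ lo hi : Nat, lo ≤ tlen rs l → tlen rs l ≤ hi → hi ≤ l.length →
      bisectLoop l rs lo hi = tlen rs l := by
  intro lo hi
  induction hfuel : hi - lo using Nat.strong_induction_on generalizing lo hi with
  | _ n ih =>
    intro hlo hhi hlen
    unfold bisectLoop
    by_cases h : lo < hi
    · simp only [dif_pos h]
      set mid := (lo + hi) / 2 with hmid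
      have hmlt : mid < hi := by omega
      have hmge : lo ≤ mid := by omega
      by_cases hc : rs < l.getD mid 0
      · -- l[mid] > rs ⇒ tlen ≤ mid
        have htm : tlen rs l ≤ mid := by
          by_contra hcon
          have := getD_lt_tlen rs l mid (by omega)
          omega
        simp only [if_pos hc]
        exact ih (mid - lo) (by omega) lo mid rfl hlo htm (by omega)
      · -- l[mid] ≤ rs ⇒ mid < tlen
        have htm : mid < tlen rs l :=
          sorted_getD_le rs l hs mid (by omega) (by omega)
        simp only [if_neg hc]
        exact ih (hi - (mid + 1)) (by omega) (mid + 1) hi rfl (by omega) hhi hlen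
    · simp only [dif_neg h]
      omega

-- ===== VERDICT (by name: the statement is the Claim_ definition above) =====
theorem pick_overview_spec : Claim_equal_pick_overview := by
  intro rs ovs _ hpre
  unfold Spec_pick_overview pick_overview pick_overview_alt
  have hb := bisectLoop_eq rs ovs hpre 0 ovs.length (Nat.zero_le _) (tlen_le rs ovs) (le_refl _)
  cases ovs with
  | nil => simp [bisectLoop]
  | cons o0 rest =>
      simp only [hb]
      by_cases h0 : rs < o0
      · have : ¬ (o0 ≤ rs) := by omega
        have ht : tlen rs (o0 :: rest) = 0 := by simp [tlen, List.takeWhile, this]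
        simp [h0, ht]
      · have hle : o0 ≤ rs := by omega
        have ht : tlen rs (o0 :: rest) ≠ 0 := by simp [tlen, List.takeWhile, hle]
        rw [if_neg h0, if_neg ht, pickLoop_eq, if_neg ht]
        simp
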